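-- pv_equiv track=rewrite | github.com/pachauriharsh07-collab/Sports-Analysis-and-Injury-Prevention | sports_analyzer.py | _track_performance_timeline
-- ===== SOURCE A (Python) =====
-- from typing import Dict, List, Tuple
--
-- def _track_performance_timeline(keypoints: List[Dict]) -> List[int]:
--     """Track performance over time"""
--     if not keypoints:
--         return [64, 68, 73, 76, 80, 78, 76, 77]
--
--     performance = []
--
--     for i, kp in enumerate(keypoints):
--         base = 65
--         variation = (i % 8) * 2
--         perf = base + variation
--         performance.append(min(100, perf))
--
--     while len(performance) < 8:
--         performance.append(75)
--
--     return performance[:8]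
-- ===== SOURCE B (Python) =====
-- from typing import Dict, List, Tuple
--
-- def _track_performance_timeline(keypoints: List[Dict]) -> List[int]:
--     if not keypoints:
--         return [64, 68, 73, 76, 80, 78, 76, 77]
--     n = min(len(keypoints), 8)
--     base = list(range(65, 81, 2))
--     return base[:n] + [75] * (8 - n)
-- ===== Notes on version B (the rewrite author's own statement) =====
-- stated objective: simpler
-- what changed: B never iterates over the keypoints: it reads only the length, slices the fixed pattern range(65,81,2) to min(len,8) and pads with 75, replacing A's per-element loop, while-padding and final slice with a length-driven closed form.
import Mathlib
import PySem

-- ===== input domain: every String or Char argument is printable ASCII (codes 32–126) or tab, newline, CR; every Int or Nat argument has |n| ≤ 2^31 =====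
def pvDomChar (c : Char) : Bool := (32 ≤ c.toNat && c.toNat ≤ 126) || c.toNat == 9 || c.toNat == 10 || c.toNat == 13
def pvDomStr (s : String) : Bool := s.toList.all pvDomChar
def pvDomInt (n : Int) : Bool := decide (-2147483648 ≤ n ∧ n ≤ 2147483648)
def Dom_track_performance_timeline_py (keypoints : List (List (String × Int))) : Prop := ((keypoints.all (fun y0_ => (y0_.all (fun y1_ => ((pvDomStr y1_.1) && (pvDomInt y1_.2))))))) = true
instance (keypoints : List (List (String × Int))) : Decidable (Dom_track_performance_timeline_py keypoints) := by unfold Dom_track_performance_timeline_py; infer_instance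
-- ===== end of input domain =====

-- B replaces A's per-element loop + while-padding by a length-driven closed form
-- (slice the fixed pattern to min(len,8) and pad with 75); objective: simpler.

-- ===== PORT A =====
-- the `while len(performance) < 8: performance.append(75)` loop
def pvPadTo8 (l : List Int) : List Int :=
  if l.length < 8 then pvPadTo8 (l ++ [75]) else l
termination_by 8 - l.length
decreasing_by simp; omega

def track_performance_timeline_py (keypoints : List (List (String × Int))) : List Int :=
  if keypoints = [] then [64, 68, 73, 76, 80, 78, 76, 77]
  else
    let performance :=
      (PySem.List.enumerate keypoints 0).foldl
        (fun acc p => acc ++ [min 100 (65 + PySem.Int.mod p.1 8 * 2)]) []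
    (pvPadTo8 performance).take 8

-- ===== PORT B =====
def track_performance_timeline_py_alt (keypoints : List (List (String × Int))) : List Int :=
  if keypoints = [] then [64, 68, 73, 76, 80, 78, 76, 77]
  else
    let n := min keypoints.length 8
    (PySem.List.pyRange 65 81 2).take n ++ List.replicate (8 - n) 75

-- ===== PRECONDITION & SPEC =====
def Spec_track_performance_timeline_py (keypoints : List (List (String × Int))) (out : List Int) : Prop := out = track_performance_timeline_py_alt keypoints
instance (keypoints : List (List (String × Int))) (out : List Int) : Decidable (Spec_track_performance_timeline_py keypoints out) := by unfold Spec_track_performance_timeline_py; infer_instance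

-- ===== CLAIM (what is proved, stated in full; the proofs are below) =====
def Claim_equal_track_performance_timeline_py : Prop := ∀ (keypoints : List (List (String × Int))), Dom_track_performance_timeline_py keypoints → Spec_track_performance_timeline_py keypoints (track_performance_timeline_py keypoints)

-- ===== LEMMAS AND PROOFS =====

-- A's append-accumulating loop is a map over the enumerated indices
theorem pv_foldl_append (f : Int → Int) :
    ∀ (l : List (Int × List (String × Int))) (init : List Int),
      l.foldl (fun acc p => acc ++ [f p.1]) init = init ++ l.map (fun p => f p.1) := by
  intro l
  induction l with
  | nil => simp
  | cons x xs ih => intro init; simp [List.foldl, ih]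

theorem pv_enum_map (f : Int → Int) (xs : List (List (String × Int))) :
    (PySem.List.enumerate xs 0).map (fun p => f p.1)
      = (PySem.List.pyRange 0 xs.length 1).map f := by
  have h := PySem.List.map_fst_enumerate (xs := xs) (s := 0)
  calc (PySem.List.enumerate xs 0).map (fun p => f p.1)
      = ((PySem.List.enumerate xs 0).map (·.1)).map f := by simp [Function.comp]
    _ = (PySem.List.pyRange 0 (0 + xs.length) 1).map f := by rw [h]
    _ = (PySem.List.pyRange 0 xs.length 1).map f := by norm_num

-- the loop body as a function of the index
def pvF (i : Int) : Int := min 100 (65 + PySem.Int.mod i 8 * 2)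

theorem pv_pad_eq (l : List Int) : pvPadTo8 l = l ++ List.replicate (8 - l.length) 75 := by
  fun_induction pvPadTo8 l with
  | case1 l h ih =>
      rw [ih]
      have h1 : 8 - l.length = (8 - (l ++ [75]).length) + 1 := by simp; omega
      rw [h1, List.replicate_succ]
      simp
  | case2 l h => simp [show 8 - l.length = 0 by omega]

-- the purely length-driven core equality
theorem pv_core (n : Nat) (hn : 1 ≤ n) :
    (pvPadTo8 ((PySem.List.pyRange 0 n 1).map pvF)).take 8
      = (PySem.List.pyRange 65 81 2).take (min n 8) ++ List.replicate (8 - min n 8) 75 := by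
  rw [pv_pad_eq]
  by_cases h8 : n ≤ 8
  · interval_cases n <;> decide
  · replace h8 : 8 < n := by omega
    have hlen : ((PySem.List.pyRange 0 (n : Int) 1).map pvF).length = n := by
      simp [PySem.List.length_pyRange_one]
    rw [hlen, show 8 - n = 0 from by omega, List.replicate_zero, List.append_nil]
    have hsplit : PySem.List.pyRange 0 (n : Int) 1
        = PySem.List.pyRange 0 8 1 ++ PySem.List.pyRange 8 (n : Int) 1 := by
      exact PySem.List.pyRange_one_append 0 8 (n : Int) (by norm_num) (by exact_mod_cast h8.le)
    rw [hsplit, List.map_append, List.take_append_of_le_length (by decide)]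
    have hmin : min n 8 = 8 := by omega
    rw [hmin]
    decide

-- ===== VERDICT (by name: the statement is the Claim_ definition above) =====
theorem track_performance_timeline_py_spec : Claim_equal_track_performance_timeline_py := by
  intro keypoints _
  unfold Spec_track_performance_timeline_py track_performance_timeline_py track_performance_timeline_py_alt
  by_cases hk : keypoints = []
  · simp [hk]
  · simp only [hk, if_false]
    rw [pv_foldl_append (fun i => min 100 (65 + PySem.Int.mod i 8 * 2)), List.nil_append,
        pv_enum_map (fun i => min 100 (65 + PySem.Int.mod i 8 * 2)) keypoints]
    have hn : 1 ≤ keypoints.length := by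
      cases keypoints with
      | nil => exact absurd rfl hk
      | cons a l => simp
    exact pv_core keypoints.length hn
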